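-- pv_equiv track=rewrite | github.com/bandidood/cybersecurity-portfolio | projects/20-threat-hunting-soc/scripts/threat-hunting/yara_engine.py | _extract_rule_names
-- ===== SOURCE A (Python) =====
-- from typing import Dict, List, Optional, Any, Tuple
--
-- def _extract_rule_names(content: str) -> List[str]:
--     """Extract rule names from YARA content."""
--     rule_names = []
--     lines = content.split('\n')
--
--     for line in lines:
--         line = line.strip()
--         if line.startswith('rule '):
--             try:
--                 rule_name = line.split()[1]
--                 if rule_name.endswith(':'):
--                     rule_name = rule_name[:-1]
--                 rule_names.append(rule_name)
--             except:
--                 continue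
--
--     return rule_names
-- ===== SOURCE B (Python) =====
-- def _extract_rule_names(content: str) -> list:
--     """Extract rule names from YARA content by a single character-level scan
--     (no per-line split/strip/tokenize): at each line start skip blanks, match
--     the literal 'rule ' header, then capture the next word."""
--     names = []
--     n = len(content)
--     blank = ' \t\r'
--     i = 0
--     while True:
--         # skip leading blanks of the current line
--         j = i
--         while j < n and content[j] in blank:
--             j += 1
--         if content[j:j + 5] == 'rule ':
--             k = j + 5
--             while k < n and content[k] in blank:
--                 k += 1
--             if k < n and content[k] != '\n':
--                 e = k
--                 while e < n and content[e] not in blank and content[e] != '\n':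
--                     e += 1
--                 name = content[k:e]
--                 if name.endswith(':'):
--                     name = name[:-1]
--                 names.append(name)
--         # advance to the start of the next line
--         nl = content.find('\n', i)
--         if nl == -1:
--             break
--         i = nl + 1
--     return names
-- ===== Notes on version B (the rewrite author's own statement) =====
-- stated objective: alternative
-- what changed: Replaces the split-into-lines / strip / tokenize-each-line pipeline with a single index-based character scan over the whole string (skip blanks at line start, match the literal 'rule ' header, capture the next blank-free run, jump to the next newline), building no intermediate line or token lists.
import Mathlib
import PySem

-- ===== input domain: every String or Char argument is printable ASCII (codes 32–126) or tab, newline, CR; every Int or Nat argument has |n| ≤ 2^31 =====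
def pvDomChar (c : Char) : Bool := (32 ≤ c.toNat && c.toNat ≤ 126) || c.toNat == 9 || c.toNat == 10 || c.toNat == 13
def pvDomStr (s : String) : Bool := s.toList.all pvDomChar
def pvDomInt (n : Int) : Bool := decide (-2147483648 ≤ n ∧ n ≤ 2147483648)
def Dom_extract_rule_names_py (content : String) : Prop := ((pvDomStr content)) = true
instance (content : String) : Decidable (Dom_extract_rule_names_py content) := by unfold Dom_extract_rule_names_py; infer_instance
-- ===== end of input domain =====

-- B replaces A's split-into-lines / strip / tokenize pipeline by a single character-level
-- scan of the whole string (objective: alternative, same O(n) cost, no intermediate lists).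

-- ===== PORT A =====
-- Transliteration of A: split on '\n'; per line strip, test the literal 'rule ' prefix,
-- take whitespace-token [1] (IndexError → continue), drop one trailing ':'.
def extract_rule_names_py (content : String) : List String :=
  let lines := PySem.Chars.splitOn content.toList ['\n']
  lines.foldl (fun acc line =>
    let line := PySem.Chars.strip line
    if PySem.Chars.startswith line ['r', 'u', 'l', 'e', ' '] then
      match PySem.List.pyGet? (PySem.Chars.split₀ line) 1 with
      | none => acc
      | some name =>
          let name := if PySem.Chars.endswith name [':'] then PySem.Chars.slice name none (some (-1)) else name
          acc ++ [String.ofList name]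
    else acc) []

-- ===== PORT B =====
def pvBlank (c : Char) : Bool := c == ' ' || c == '\t' || c == '\r'

def pvWord (c : Char) : Bool := !(pvBlank c || c == '\n')

-- length of dropWhile (cited by pvScan's termination proof)
theorem pvLenDW {α : Type} (p : α → Bool) (l : List α) : (l.dropWhile p).length ≤ l.length := by
  induction l with
  | nil => simp
  | cons a l ih =>
      rw [List.dropWhile_cons]
      split
      · exact Nat.le_trans ih (by simp)
      · simp

-- one iteration of B's while-loop body: the header check at the current line start
def pvHead (cs : List Char) (acc : List String) : List String :=
  let t := cs.dropWhile pvBlank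
  if t.take 5 = ['r', 'u', 'l', 'e', ' '] then
    match (t.drop 5).dropWhile pvBlank with
    | [] => acc
    | c :: u =>
        if c == '\n' then acc
        else
          let name := List.takeWhile pvWord (c :: u)
          let name := if PySem.Chars.endswith name [':'] then name.dropLast else name
          acc ++ [String.ofList name]
  else acc

-- B's outer loop: process the line at the head of cs, then jump past the next '\n'
def pvScan (cs : List Char) (acc : List String) : List String :=
  match h : cs.dropWhile (fun c => !(c == '\n')) with
  | [] => pvHead cs acc
  | _ :: tl => pvScan tl (pvHead cs acc)
termination_by cs.length
decreasing_by
  have hle := pvLenDW (fun c => !(c == '\n')) cs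
  rw [h] at hle
  simp at hle
  omega

def extract_rule_names_py_alt (content : String) : List String :=
  pvScan content.toList []

-- ===== PRECONDITION & SPEC =====
def Spec_extract_rule_names_py (content : String) (out : List String) : Prop := out = extract_rule_names_py_alt content
instance (content : String) (out : List String) : Decidable (Spec_extract_rule_names_py content out) := by unfold Spec_extract_rule_names_py; infer_instance

-- ===== CLAIM (what is proved, stated in full; the proofs are below) =====
def Claim_equal_extract_rule_names_py : Prop := ∀ (content : String), Dom_extract_rule_names_py content → Spec_extract_rule_names_py content (extract_rule_names_py content)

-- ===== LEMMAS AND PROOFS =====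

-- ---------- generic list lemmas ----------

theorem pvTWDW {α : Type} (p : α → Bool) (l : List α) : l.takeWhile p ++ l.dropWhile p = l := by
  induction l with
  | nil => simp
  | cons a l ih =>
      rw [List.takeWhile_cons, List.dropWhile_cons]
      by_cases h : p a = true
      · simp [h, ih]
      · simp [h]

theorem pvDW_sub {α : Type} (p : α → Bool) (l : List α) : ∀ c ∈ l.dropWhile p, c ∈ l := by
  induction l with
  | nil => simp
  | cons a l ih =>
      intro c hc
      rw [List.dropWhile_cons] at hc
      by_cases h : p a = true
      · simp [h] at hc; exact List.mem_cons_of_mem a (ih c hc)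
      · simp [h] at hc; simpa using hc

theorem pvTW_pred {α : Type} (p : α → Bool) (l : List α) : ∀ c ∈ l.takeWhile p, p c = true := by
  induction l with
  | nil => simp
  | cons a l ih =>
      intro c hc
      rw [List.takeWhile_cons] at hc
      by_cases h : p a = true
      · simp [h] at hc
        rcases hc with h1 | h1
        · subst h1; exact h
        · exact ih c h1
      · simp [h] at hc

theorem pvDW_nil_iff {α : Type} (p : α → Bool) (l : List α) :
    l.dropWhile p = [] ↔ ∀ c ∈ l, p c = true := by
  induction l with
  | nil => simp
  | cons a l ih =>
      rw [List.dropWhile_cons]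
      by_cases h : p a = true
      · simp [h, ih]
      · simp [h]

theorem pvDW_head {α : Type} (p : α → Bool) {l : List α} {c : α} {u : List α}
    (h : l.dropWhile p = c :: u) : p c = false := by
  induction l with
  | nil => simp at h
  | cons a l ih =>
      rw [List.dropWhile_cons] at h
      by_cases ha : p a = true
      · simp [ha] at h; exact ih h
      · simp [ha] at h; rcases h with ⟨h1, _⟩; subst h1; simpa using ha

theorem pvDW_congr {α : Type} (p q : α → Bool) (l : List α)
    (h : ∀ c ∈ l, p c = q c) : l.dropWhile p = l.dropWhile q := by
  induction l with
  | nil => simp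
  | cons a l ih =>
      rw [List.dropWhile_cons, List.dropWhile_cons, h a (List.mem_cons_self)]
      split
      · exact ih (fun c hc => h c (List.mem_cons_of_mem a hc))
      · rfl

theorem pvTW_congr {α : Type} (p q : α → Bool) (l : List α)
    (h : ∀ c ∈ l, p c = q c) : l.takeWhile p = l.takeWhile q := by
  induction l with
  | nil => simp
  | cons a l ih =>
      rw [List.takeWhile_cons, List.takeWhile_cons, h a (List.mem_cons_self)]
      split
      · rw [ih (fun c hc => h c (List.mem_cons_of_mem a hc))]
      · rfl

theorem pvDW_append_nil {α : Type} (p : α → Bool) (a b : List α)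
    (h : a.dropWhile p = []) : (a ++ b).dropWhile p = b.dropWhile p := by
  induction a with
  | nil => simp
  | cons x a ih =>
      rw [List.dropWhile_cons] at h
      rw [List.cons_append, List.dropWhile_cons]
      by_cases hx : p x = true
      · rw [if_pos hx] at h; rw [if_pos hx]; exact ih h
      · rw [if_neg hx] at h; exact absurd h (by simp)

theorem pvDW_append_cons {α : Type} (p : α → Bool) (a b : List α) {c : α} {u : List α}
    (h : a.dropWhile p = c :: u) : (a ++ b).dropWhile p = c :: (u ++ b) := by
  induction a with
  | nil => simp at h
  | cons x a ih =>
      rw [List.dropWhile_cons] at h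
      rw [List.cons_append, List.dropWhile_cons]
      by_cases hx : p x = true
      · rw [if_pos hx] at h; rw [if_pos hx]; exact ih h
      · rw [if_neg hx] at h
        injection h with h1 h2
        subst h1; subst h2
        rw [if_neg hx]

theorem pvTW_append_stop {α : Type} (p : α → Bool) (a : List α) {c : α} (d : List α)
    (hc : p c = false) : (a ++ c :: d).takeWhile p = a.takeWhile p := by
  induction a with
  | nil => simp [List.takeWhile_cons, hc]
  | cons x a ih =>
      rw [List.cons_append, List.takeWhile_cons, List.takeWhile_cons]
      split
      · rw [ih]
      · rfl

theorem pvTake_append {α : Type} (n : Nat) (a b : List α) :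
    (a ++ b).take n = a.take n ++ b.take (n - a.length) := by
  induction a generalizing n with
  | nil => simp
  | cons x a ih =>
      cases n with
      | zero => simp
      | succ m => simp [List.take_succ_cons, ih m, Nat.succ_sub_succ]

theorem pvDrop_append {α : Type} (n : Nat) (a b : List α) :
    (a ++ b).drop n = a.drop n ++ b.drop (n - a.length) := by
  induction a generalizing n with
  | nil => simp
  | cons x a ih =>
      cases n with
      | zero => simp
      | succ m => simp [ih m, Nat.succ_sub_succ]

-- ---------- characters: Python whitespace vs B's blank set on the domain ----------

theorem pvCharEq (c d : Char) : c = d ↔ c.toNat = d.toNat := by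
  constructor
  · intro h; rw [h]
  · intro h
    apply Char.ext
    apply UInt32.toNat_inj.mp
    exact h

theorem pvSpEqBl {c : Char} (hd : pvDomChar c = true) (hn : c ≠ '\n') :
    PySem.Chars.isspace c = pvBlank c := by
  have hn10 : c.toNat ≠ 10 := fun h => hn ((pvCharEq c '\n').mpr (by simpa using h))
  simp only [pvDomChar, Bool.or_eq_true, Bool.and_eq_true, decide_eq_true_eq,
    beq_iff_eq] at hd
  rw [Bool.eq_iff_iff]
  unfold PySem.Chars.isspace pvBlank
  simp only [Bool.or_eq_true, Bool.and_eq_true, decide_eq_true_eq, beq_iff_eq,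
    pvCharEq c ' ', pvCharEq c '\t', pvCharEq c '\r']
  have h32 : (' ').toNat = 32 := rfl
  have h9 : ('\t').toNat = 9 := rfl
  have h13 : ('\r').toNat = 13 := rfl
  rw [h32, h9, h13]
  omega

def pvW (c : Char) : Bool := !PySem.Chars.isspace c

theorem pvWEqWord {c : Char} (hd : pvDomChar c = true) (hn : c ≠ '\n') :
    pvW c = pvWord c := by
  unfold pvW pvWord
  rw [pvSpEqBl hd hn]
  have : (c == '\n') = false := beq_eq_false_iff_ne.mpr hn
  rw [this, Bool.or_false]

-- ---------- pvSplitNl : the behaviour of content.split('\n') ----------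

def pvSplitNl : List Char → List (List Char)
  | [] => [[]]
  | c :: rest =>
      if c = '\n' then [] :: pvSplitNl rest
      else
        match pvSplitNl rest with
        | [] => [[c]]
        | l :: ls => (c :: l) :: ls

theorem pvSplitNl_ne_nil (l : List Char) : pvSplitNl l ≠ [] := by
  cases l with
  | nil => simp [pvSplitNl]
  | cons c rest =>
      simp only [pvSplitNl]
      split
      · simp
      · split <;> simp

theorem pvSplitNl_no_nl (cs : List Char) (h : ∀ c ∈ cs, c ≠ '\n') : pvSplitNl cs = [cs] := by
  induction cs with
  | nil => rfl
  | cons a l ih =>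
      have ha : a ≠ '\n' := h a List.mem_cons_self
      have hl := ih (fun c hc => h c (List.mem_cons_of_mem a hc))
      simp only [pvSplitNl, if_neg ha, hl]

theorem pvSplitNl_append (line tl : List Char) (h : ∀ c ∈ line, c ≠ '\n') :
    pvSplitNl (line ++ '\n' :: tl) = line :: pvSplitNl tl := by
  induction line with
  | nil => simp [pvSplitNl]
  | cons a l ih =>
      have ha : a ≠ '\n' := h a List.mem_cons_self
      have hl := ih (fun c hc => h c (List.mem_cons_of_mem a hc))
      simp only [List.cons_append, pvSplitNl, if_neg ha, hl]

theorem pvSplitNl_mem (cs : List Char) : ∀ l ∈ pvSplitNl cs, ∀ c ∈ l, c ∈ cs ∧ c ≠ '\n' := by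
  induction cs with
  | nil =>
      intro l hl c hc
      simp [pvSplitNl] at hl
      subst hl; simp at hc
  | cons a r ih =>
      intro l hl c hc
      simp only [pvSplitNl] at hl
      by_cases ha : a = '\n'
      · rw [if_pos ha] at hl
        rcases List.mem_cons.mp hl with h1 | h1
        · subst h1; simp at hc
        · obtain ⟨hm, hne⟩ := ih l h1 c hc
          exact ⟨List.mem_cons_of_mem a hm, hne⟩
      · rw [if_neg ha] at hl
        cases hps : pvSplitNl r with
        | nil => exact absurd hps (pvSplitNl_ne_nil r)
        | cons p ps =>
            rw [hps] at hl
            rcases List.mem_cons.mp hl with h1 | h1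
            · subst h1
              rcases List.mem_cons.mp hc with h2 | h2
              · subst h2; exact ⟨List.mem_cons_self, ha⟩
              · obtain ⟨hm, hne⟩ := ih p (by rw [hps]; exact List.mem_cons_self) c h2
                exact ⟨List.mem_cons_of_mem a hm, hne⟩
            · obtain ⟨hm, hne⟩ := ih l (by rw [hps]; exact List.mem_cons_of_mem p h1) c hc
              exact ⟨List.mem_cons_of_mem a hm, hne⟩

-- splitOn ['\n'] computes pvSplitNl
def pvMapHead (f : List Char → List Char) : List (List Char) → List (List Char)
  | [] => []
  | x :: xs => f x :: xs

theorem pvSplitOn_go_spec : ∀ (fuel : Nat) (l cur : List Char) (acc : List (List Char)),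
    l.length < fuel →
    PySem.Chars.splitOn.go ['\n'] fuel l cur acc
      = acc.reverse ++ pvMapHead (fun x => cur.reverse ++ x) (pvSplitNl l) := by
  intro fuel
  induction fuel with
  | zero => intro l cur acc h; omega
  | succ n ih =>
      intro l cur acc h
      cases l with
      | nil =>
          simp [PySem.Chars.splitOn.go, pvSplitNl, pvMapHead]
      | cons c rest =>
          have hpre : (['\n'].isPrefixOf (c :: rest)) = (c == '\n') := by
            rw [Bool.eq_iff_iff]
            constructor
            · intro h1
              obtain ⟨t, ht⟩ := List.isPrefixOf_iff_prefix.mp h1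
              rw [List.cons_append, List.nil_append] at ht
              injection ht with h1' h2'
              rw [← h1']
              simp
            · intro h1
              have hc : c = '\n' := by simpa using h1
              subst hc
              exact List.isPrefixOf_iff_prefix.mpr ⟨rest, rfl⟩
          rw [show PySem.Chars.splitOn.go ['\n'] (n + 1) (c :: rest) cur acc
              = if ['\n'].isPrefixOf (c :: rest) then
                  PySem.Chars.splitOn.go ['\n'] n (List.drop 1 (c :: rest)) [] (cur.reverse :: acc)
                else PySem.Chars.splitOn.go ['\n'] n rest (c :: cur) acc from rfl]
          rw [hpre]
          by_cases hc : c = '\n'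
          · rw [if_pos (by simp [hc])]
            simp only [List.drop_succ_cons, List.drop_zero]
            rw [ih rest [] (cur.reverse :: acc) (by simp at h; omega)]
            have hmh : pvMapHead (fun x => List.reverse [] ++ x) (pvSplitNl rest) = pvSplitNl rest := by
              cases hps : pvSplitNl rest with
              | nil => rfl
              | cons p ps => simp [pvMapHead]
            rw [hmh]
            simp [pvSplitNl, hc, pvMapHead]
          · rw [if_neg (by simp [hc])]
            rw [ih rest (c :: cur) acc (by simp at h; omega)]
            simp only [pvSplitNl, if_neg hc]
            cases hps : pvSplitNl rest with
            | nil => exact absurd hps (pvSplitNl_ne_nil rest)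
            | cons p ps => simp [pvMapHead]

theorem pvSplitOn_eq (l : List Char) : PySem.Chars.splitOn l ['\n'] = pvSplitNl l := by
  unfold PySem.Chars.splitOn
  rw [pvSplitOn_go_spec (l.length + 1) l [] [] (by omega)]
  cases hps : pvSplitNl l with
  | nil => exact absurd hps (pvSplitNl_ne_nil l)
  | cons p ps => simp [pvMapHead]

-- ---------- pvWords : the behaviour of line.split() ----------

def pvWords (l : List Char) : List (List Char) :=
  match h : l.dropWhile PySem.Chars.isspace with
  | [] => []
  | c :: rest => (c :: rest.takeWhile pvW) :: pvWords (rest.dropWhile pvW)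
termination_by l.length
decreasing_by
  have h1 := pvLenDW PySem.Chars.isspace l
  rw [h] at h1
  simp at h1
  have h2 := pvLenDW pvW rest
  omega

theorem pvWords_eq_nil {l : List Char} (h : l.dropWhile PySem.Chars.isspace = []) :
    pvWords l = [] := by
  conv_lhs => rw [pvWords]
  split
  · rfl
  · rename_i c rest h'
    rw [h] at h'
    exact absurd h' (by simp)

theorem pvWords_eq_cons {l : List Char} {c : Char} {rest : List Char}
    (h : l.dropWhile PySem.Chars.isspace = c :: rest) :
    pvWords l = (c :: rest.takeWhile pvW) :: pvWords (rest.dropWhile pvW) := by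
  conv_lhs => rw [pvWords]
  split
  · rename_i h'
    rw [h] at h'
    exact absurd h' (by simp)
  · rename_i c' rest' h'
    rw [h] at h'
    injection h' with h1 h2
    subst h1; subst h2
    rfl

theorem pvWords_congr {a b : List Char}
    (h : a.dropWhile PySem.Chars.isspace = b.dropWhile PySem.Chars.isspace) :
    pvWords a = pvWords b := by
  cases hb : b.dropWhile PySem.Chars.isspace with
  | nil => rw [pvWords_eq_nil (h.trans hb), pvWords_eq_nil hb]
  | cons c rest => rw [pvWords_eq_cons (h.trans hb), pvWords_eq_cons hb]

theorem pvSplit₀_go_spec : ∀ (l cur : List Char) (acc : List (List Char)),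
    PySem.Chars.split₀.go l cur acc
      = acc.reverse ++ (if cur.isEmpty then pvWords l
          else (cur.reverse ++ l.takeWhile pvW) :: pvWords (l.dropWhile pvW)) := by
  intro l
  induction l with
  | nil =>
      intro cur acc
      have h0 : pvWords [] = [] := pvWords_eq_nil (l := []) (by simp)
      cases cur with
      | nil => simp [PySem.Chars.split₀.go, h0]
      | cons x xs => simp [PySem.Chars.split₀.go, h0]
  | cons c rest ih =>
      intro cur acc
      rw [show PySem.Chars.split₀.go (c :: rest) cur acc
          = if PySem.Chars.isspace c then
              (if cur.isEmpty then PySem.Chars.split₀.go rest [] acc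
               else PySem.Chars.split₀.go rest [] (cur.reverse :: acc))
            else PySem.Chars.split₀.go rest (c :: cur) acc from rfl]
      by_cases hc : PySem.Chars.isspace c = true
      · rw [if_pos hc]
        have hw : pvW c = false := by simp [pvW, hc]
        have hcong : pvWords (c :: rest) = pvWords rest :=
          pvWords_congr (by rw [List.dropWhile_cons, if_pos hc])
        cases cur with
        | nil =>
            rw [if_pos (by simp), ih [] acc]
            simp [hcong]
        | cons x xs =>
            rw [if_neg (by simp), ih [] (List.reverse (x :: xs) :: acc)]
            simp [hcong, List.takeWhile_cons, List.dropWhile_cons, hw]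
      · rw [if_neg hc]
        have hw : pvW c = true := by simp [pvW, hc]
        rw [ih (c :: cur) acc]
        cases cur with
        | nil =>
            rw [if_neg (by simp), if_pos (by simp)]
            rw [pvWords_eq_cons (l := c :: rest) (by rw [List.dropWhile_cons, if_neg hc])]
            simp
        | cons x xs =>
            rw [if_neg (by simp), if_neg (by simp)]
            simp [List.takeWhile_cons, List.dropWhile_cons, hw]

theorem pvSplit₀_eq (l : List Char) : PySem.Chars.split₀ l = pvWords l := by
  unfold PySem.Chars.split₀
  rw [pvSplit₀_go_spec l [] []]
  simp

-- ---------- rstrip decomposition ----------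

theorem pvRstrip_decomp (t : List Char) :
    ∃ w, t = PySem.Chars.rstrip t ++ w ∧ ∀ c ∈ w, PySem.Chars.isspace c = true := by
  refine ⟨(t.reverse.takeWhile PySem.Chars.isspace).reverse, ?_, ?_⟩
  · unfold PySem.Chars.rstrip
    calc t = t.reverse.reverse := (List.reverse_reverse t).symm
      _ = (t.reverse.takeWhile PySem.Chars.isspace ++ t.reverse.dropWhile PySem.Chars.isspace).reverse := by
            rw [pvTWDW]
      _ = (t.reverse.dropWhile PySem.Chars.isspace).reverse ++ (t.reverse.takeWhile PySem.Chars.isspace).reverse := by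
            rw [List.reverse_append]
  · intro c hc
    rw [List.mem_reverse] at hc
    exact pvTW_pred _ _ c hc

theorem pvRstrip_append (a b : List Char) (hb : ∃ c ∈ b, PySem.Chars.isspace c = false) :
    PySem.Chars.rstrip (a ++ b) = a ++ PySem.Chars.rstrip b := by
  unfold PySem.Chars.rstrip
  rw [List.reverse_append]
  obtain ⟨c, hc, hcs⟩ := hb
  cases hdw : b.reverse.dropWhile PySem.Chars.isspace with
  | nil =>
      have := (pvDW_nil_iff _ _).mp hdw c (List.mem_reverse.mpr hc)
      rw [this] at hcs; simp at hcs
  | cons x u =>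
      rw [pvDW_append_cons _ _ _ hdw]
      simp

-- trailing whitespace does not change the words
theorem pvWords_append_space : ∀ (n : Nat) (a w : List Char), a.length ≤ n →
    (∀ c ∈ w, PySem.Chars.isspace c = true) → pvWords (a ++ w) = pvWords a := by
  intro n
  induction n with
  | zero =>
      intro a w ha hw
      have : a = [] := by cases a <;> simp_all
      subst this
      simp only [List.nil_append]
      rw [pvWords_eq_nil (l := w) ((pvDW_nil_iff _ _).mpr hw), pvWords_eq_nil (l := []) (by simp)]
  | succ m ih =>
      intro a w ha hw
      cases hda : a.dropWhile PySem.Chars.isspace with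
      | nil =>
          rw [pvWords_eq_nil hda]
          rw [pvWords_eq_nil]
          rw [pvDW_append_nil _ _ _ hda]
          exact (pvDW_nil_iff _ _).mpr hw
      | cons c u =>
          rw [pvWords_eq_cons hda]
          rw [pvWords_eq_cons (pvDW_append_cons _ _ _ hda)]
          have htw : (u ++ w).takeWhile pvW = u.takeWhile pvW := by
            cases w with
            | nil => simp
            | cons w0 w' =>
                exact pvTW_append_stop pvW u w' (by simp [pvW, hw w0 List.mem_cons_self])
          have hdww : (u ++ w).dropWhile pvW = u.dropWhile pvW ++ w := by
            cases hdu : u.dropWhile pvW with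
            | nil =>
                rw [pvDW_append_nil _ _ _ hdu]
                simp only [List.nil_append]
                cases w with
                | nil => simp
                | cons w0 w' =>
                    rw [List.dropWhile_cons, if_neg (by simp [pvW, hw w0 List.mem_cons_self])]
            | cons x v => rw [pvDW_append_cons _ _ _ hdu]; simp
          rw [htw, hdww]
          have hlen : (u.dropWhile pvW).length ≤ m := by
            have h1 := pvLenDW PySem.Chars.isspace a
            rw [hda] at h1
            simp at h1
            have h2 := pvLenDW pvW u
            omega
          rw [ih (u.dropWhile pvW) w hlen hw]

-- ---------- per-line helpers ----------

def pvGA (line : List Char) : List String :=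
  let s := PySem.Chars.strip line
  if PySem.Chars.startswith s ['r', 'u', 'l', 'e', ' '] then
    match PySem.List.pyGet? (PySem.Chars.split₀ s) 1 with
    | none => []
    | some name =>
        [String.ofList (if PySem.Chars.endswith name [':'] then PySem.Chars.slice name none (some (-1)) else name)]
  else []

def pvGB (line : List Char) : List String := pvHead line []

theorem pvHead_acc (cs : List Char) (acc : List String) :
    pvHead cs acc = acc ++ pvHead cs [] := by
  simp only [pvHead]
  split
  · split
    · simp
    · split <;> simp
  · simp

theorem pvScan_eq_nil {cs : List Char} (acc : List String)
    (h : cs.dropWhile (fun c => !(c == '\n')) = []) : pvScan cs acc = pvHead cs acc := by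
  conv_lhs => rw [pvScan]
  split
  · rfl
  · rename_i x tl h'
    rw [h] at h'
    exact absurd h' (by simp)

theorem pvScan_eq_cons {cs : List Char} {x : Char} {tl : List Char} (acc : List String)
    (h : cs.dropWhile (fun c => !(c == '\n')) = x :: tl) :
    pvScan cs acc = pvScan tl (pvHead cs acc) := by
  conv_lhs => rw [pvScan]
  split
  · rename_i h'
    rw [h] at h'
    exact absurd h' (by simp)
  · rename_i y tl' h'
    rw [h] at h'
    injection h' with h1 h2
    subst h2
    rfl

-- the literal 'rule ' header test ignores everything past the first newline
theorem pvTake5_append (t tl : List Char) (hn : '\n' ∉ t) :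
    ((t ++ '\n' :: tl).take 5 = ['r', 'u', 'l', 'e', ' ']) ↔ (t.take 5 = ['r', 'u', 'l', 'e', ' ']) := by
  rw [pvTake_append]
  by_cases h5 : 5 ≤ t.length
  · have : 5 - t.length = 0 := by omega
    rw [this]
    simp
  · have hlt : t.length < 5 := by omega
    have ht : t.take 5 = t := List.take_of_length_le (by omega)
    rw [ht]
    constructor
    · intro h
      exfalso
      have h1 : 5 - t.length = (5 - t.length - 1) + 1 := by omega
      rw [h1] at h
      simp only [List.take_succ_cons] at h
      have : '\n' ∈ t ++ '\n' :: List.take (5 - t.length - 1) tl := by simp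
      rw [h] at this
      simp at this
    · intro h
      exfalso
      have := congrArg List.length h
      simp at this
      omega

theorem pvHead_append (line tl : List Char) (acc : List String)
    (h : ∀ c ∈ line, c ≠ '\n') :
    pvHead (line ++ '\n' :: tl) acc = pvHead line acc := by
  have hdw : (line ++ '\n' :: tl).dropWhile pvBlank = line.dropWhile pvBlank ++ '\n' :: tl := by
    cases hld : line.dropWhile pvBlank with
    | nil => rw [pvDW_append_nil _ _ _ hld, List.dropWhile_cons, if_neg (by simp [pvBlank])]; simp
    | cons x u => rw [pvDW_append_cons _ _ _ hld]; simp
  have htn : '\n' ∉ line.dropWhile pvBlank := fun hc => h '\n' (pvDW_sub _ _ _ hc) rfl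
  simp only [pvHead, hdw]
  by_cases h5 : (line.dropWhile pvBlank).take 5 = ['r', 'u', 'l', 'e', ' ']
  · rw [if_pos ((pvTake5_append _ tl htn).mpr h5), if_pos h5]
    have hlen5 : 5 ≤ (line.dropWhile pvBlank).length := by
      have := congrArg List.length h5
      simp [List.length_take] at this
      omega
    have hdrop : (line.dropWhile pvBlank ++ '\n' :: tl).drop 5 = (line.dropWhile pvBlank).drop 5 ++ '\n' :: tl := by
      rw [pvDrop_append]
      have : 5 - (line.dropWhile pvBlank).length = 0 := by omega
      rw [this]
      simp
    rw [hdrop]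
    have hdw2 : ((line.dropWhile pvBlank).drop 5 ++ '\n' :: tl).dropWhile pvBlank
        = ((line.dropWhile pvBlank).drop 5).dropWhile pvBlank ++ '\n' :: tl := by
      cases hld : ((line.dropWhile pvBlank).drop 5).dropWhile pvBlank with
      | nil => rw [pvDW_append_nil _ _ _ hld, List.dropWhile_cons, if_neg (by simp [pvBlank])]; simp
      | cons x u => rw [pvDW_append_cons _ _ _ hld]; simp
    rw [hdw2]
    cases hr2 : ((line.dropWhile pvBlank).drop 5).dropWhile pvBlank with
    | nil => simp
    | cons c u =>
        have hcm : c ∈ line :=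
          pvDW_sub pvBlank line c (List.drop_subset _ _
            (pvDW_sub pvBlank _ c (by rw [hr2]; exact List.mem_cons_self)))
        have hcn : (c == '\n') = false := beq_eq_false_iff_ne.mpr (h c hcm)
        simp only [List.cons_append, hcn, Bool.false_eq_true, if_false]
        rw [List.takeWhile_cons, List.takeWhile_cons]
        by_cases hwc : pvWord c = true
        · rw [if_pos hwc, if_pos hwc]
          have : (u ++ '\n' :: tl).takeWhile pvWord = u.takeWhile pvWord :=
            pvTW_append_stop pvWord u tl (by simp [pvWord])
          rw [this]
        · rw [if_neg hwc, if_neg hwc]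
  · rw [if_neg (fun hh => h5 ((pvTake5_append _ tl htn).mp hh)), if_neg h5]

-- B's scan = flatMap of the per-line function over the '\n'-split
theorem pvScan_spec : ∀ (n : Nat) (cs : List Char) (acc : List String), cs.length ≤ n →
    pvScan cs acc = acc ++ (pvSplitNl cs).flatMap pvGB := by
  intro n
  induction n with
  | zero =>
      intro cs acc h
      have : cs = [] := by cases cs <;> simp_all
      subst this
      rw [pvScan_eq_nil acc (by simp)]
      rw [pvSplitNl_no_nl [] (by simp)]
      simp only [List.flatMap_cons, List.flatMap_nil, List.append_nil]
      exact pvHead_acc [] acc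
  | succ m ih =>
      intro cs acc h
      cases hdw : cs.dropWhile (fun c => !(c == '\n')) with
      | nil =>
          rw [pvScan_eq_nil acc hdw]
          have hnonl : ∀ c ∈ cs, c ≠ '\n' := by
            intro c hc
            have := (pvDW_nil_iff _ _).mp hdw c hc
            simpa using this
          rw [pvSplitNl_no_nl cs hnonl]
          simp only [List.flatMap_cons, List.flatMap_nil, List.append_nil]
          exact pvHead_acc cs acc
      | cons b tl =>
          have hb : b = '\n' := by
            have := pvDW_head _ hdw
            simpa using this
          subst hb
          have heq : cs = cs.takeWhile (fun c => !(c == '\n')) ++ '\n' :: tl := by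
            conv_lhs => rw [← pvTWDW (fun c => !(c == '\n')) cs]
            rw [hdw]
          have hline : ∀ c ∈ cs.takeWhile (fun c => !(c == '\n')), c ≠ '\n' := by
            intro c hc
            have := pvTW_pred _ _ c hc
            simpa using this
          rw [pvScan_eq_cons acc hdw]
          have hlen : tl.length ≤ m := by
            have := congrArg List.length heq
            simp at this
            omega
          rw [ih tl (pvHead cs acc) hlen]
          rw [show pvHead cs acc = pvHead (cs.takeWhile (fun c => !(c == '\n')) ++ '\n' :: tl) acc from by rw [← heq]]
          rw [pvHead_append _ tl acc hline]
          rw [pvHead_acc]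
          conv_rhs => rw [heq]
          rw [pvSplitNl_append _ tl hline]
          simp only [List.flatMap_cons, List.append_assoc]
          rfl

-- ---------- per line: A's pipeline = B's scan ----------

theorem pvPyGet1 {α : Type} (x y : α) (l : List α) :
    PySem.List.pyGet? (x :: y :: l) 1 = some y := by
  simp [PySem.List.pyGet?, PySem.List.pyIdx?]

theorem pvSlice_neg_one (l : List Char) :
    PySem.Chars.slice l none (some (-1)) = l.dropLast := by
  have h := PySem.Str.slice_to_neg_one (String.ofList l)
  simp only [PySem.Str.slice] at h
  simpa using h

theorem pvGA_eq_pvGB (line : List Char)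
    (hdom : ∀ c ∈ line, pvDomChar c = true) (hn : '\n' ∉ line) :
    pvGA line = pvGB line := by
  have hsp : ∀ c ∈ line, PySem.Chars.isspace c = pvBlank c :=
    fun c hc => pvSpEqBl (hdom c hc) (fun h => hn (h ▸ hc))
  have hlstrip : line.dropWhile PySem.Chars.isspace = line.dropWhile pvBlank :=
    pvDW_congr _ _ _ hsp
  have hstrip : PySem.Chars.strip line = PySem.Chars.rstrip (line.dropWhile pvBlank) := by
    unfold PySem.Chars.strip PySem.Chars.lstrip
    rw [hlstrip]
  have htsub : ∀ c ∈ line.dropWhile pvBlank, c ∈ line := pvDW_sub _ _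
  by_cases h5 : (line.dropWhile pvBlank).take 5 = ['r', 'u', 'l', 'e', ' ']
  · have hlen5 : 5 ≤ (line.dropWhile pvBlank).length := by
      have := congrArg List.length h5
      simp [List.length_take] at this
      omega
    have htRd : line.dropWhile pvBlank = ['r', 'u', 'l', 'e', ' '] ++ (line.dropWhile pvBlank).drop 5 := by
      conv_lhs => rw [← List.take_append_drop 5 (line.dropWhile pvBlank)]
      rw [h5]
    have hdsub : ∀ c ∈ (line.dropWhile pvBlank).drop 5, c ∈ line :=
      fun c hc => htsub c (List.drop_subset _ _ hc)
    have hdw : ((line.dropWhile pvBlank).drop 5).dropWhile PySem.Chars.isspace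
        = ((line.dropWhile pvBlank).drop 5).dropWhile pvBlank :=
      pvDW_congr _ _ _ (fun c hc => hsp c (hdsub c hc))
    cases hr2 : ((line.dropWhile pvBlank).drop 5).dropWhile pvBlank with
    | nil =>
        -- the rest of the line is all blank: A's strip removes it and the prefix test fails
        have hall : ∀ c ∈ (line.dropWhile pvBlank).drop 5, pvBlank c = true := (pvDW_nil_iff _ _).mp hr2
        have hallsp : ∀ c ∈ (line.dropWhile pvBlank).drop 5, PySem.Chars.isspace c = true :=
          fun c hc => by rw [hsp c (hdsub c hc)]; exact hall c hc
        have hrs : PySem.Chars.rstrip (line.dropWhile pvBlank) = ['r', 'u', 'l', 'e'] := by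
          rw [htRd]
          unfold PySem.Chars.rstrip
          rw [List.reverse_append]
          rw [pvDW_append_nil _ _ _ ((pvDW_nil_iff _ _).mpr
            (fun c hc => hallsp c (List.mem_reverse.mp hc)))]
          decide
        simp only [pvGA, pvGB, pvHead, hstrip, hrs]
        rw [if_neg (by decide), if_pos h5, hr2]
    | cons c u =>
        have hcd : c ∈ (line.dropWhile pvBlank).drop 5 := by
          apply pvDW_sub pvBlank
          rw [hr2]; exact List.mem_cons_self
        have hcm : c ∈ line := hdsub c hcd
        have hcbl : pvBlank c = false := pvDW_head _ hr2
        have hcn : c ≠ '\n' := fun h => hn (h ▸ hcm)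
        have hcsp : PySem.Chars.isspace c = false := by rw [hsp c hcm]; exact hcbl
        have husub : ∀ x ∈ u, x ∈ line := by
          intro x hx
          apply hdsub
          apply pvDW_sub pvBlank
          rw [hr2]
          exact List.mem_cons_of_mem c hx
        -- strip keeps the 'rule ' prefix
        obtain ⟨w, hw1, hw2⟩ := pvRstrip_decomp ((line.dropWhile pvBlank).drop 5)
        have hrs : PySem.Chars.rstrip (line.dropWhile pvBlank)
            = ['r', 'u', 'l', 'e', ' '] ++ PySem.Chars.rstrip ((line.dropWhile pvBlank).drop 5) := by
          rw [htRd]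
          exact pvRstrip_append _ _ ⟨c, hcd, hcsp⟩
        have hsw : PySem.Chars.startswith (['r', 'u', 'l', 'e', ' '] ++
            PySem.Chars.rstrip ((line.dropWhile pvBlank).drop 5)) ['r', 'u', 'l', 'e', ' '] = true := by
          rw [PySem.Chars.startswith_iff]
          exact List.prefix_append _ _
        -- words of the stripped line
        have hwords : pvWords (['r', 'u', 'l', 'e', ' '] ++ PySem.Chars.rstrip ((line.dropWhile pvBlank).drop 5))
            = ['r', 'u', 'l', 'e'] :: (c :: u.takeWhile pvW) :: pvWords (u.dropWhile pvW) := by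
          have hWapp : (['r', 'u', 'l', 'e', ' '] ++ PySem.Chars.rstrip ((line.dropWhile pvBlank).drop 5)) ++ w
              = ['r', 'u', 'l', 'e', ' '] ++ (line.dropWhile pvBlank).drop 5 := by
            rw [List.append_assoc, ← hw1]
          have h1 := pvWords_append_space
            ((['r', 'u', 'l', 'e', ' '] ++ PySem.Chars.rstrip ((line.dropWhile pvBlank).drop 5)).length)
            (['r', 'u', 'l', 'e', ' '] ++ PySem.Chars.rstrip ((line.dropWhile pvBlank).drop 5)) w le_rfl hw2
          rw [hWapp] at h1
          rw [← h1]
          -- now compute pvWords ('r'::'u'::'l'::'e'::' ':: d)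
          have hscr : (['r', 'u', 'l', 'e', ' '] ++ (line.dropWhile pvBlank).drop 5).dropWhile PySem.Chars.isspace
              = 'r' :: ('u' :: 'l' :: 'e' :: ' ' :: (line.dropWhile pvBlank).drop 5) := by
            rw [show (['r', 'u', 'l', 'e', ' '] ++ (line.dropWhile pvBlank).drop 5)
                = 'r' :: ('u' :: 'l' :: 'e' :: ' ' :: (line.dropWhile pvBlank).drop 5) from rfl]
            rw [List.dropWhile_cons, if_neg (by decide)]
          rw [pvWords_eq_cons hscr]
          have htake : ('u' :: 'l' :: 'e' :: ' ' :: (line.dropWhile pvBlank).drop 5).takeWhile pvW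
              = ['u', 'l', 'e'] := by
            rw [List.takeWhile_cons, if_pos (by decide), List.takeWhile_cons, if_pos (by decide),
              List.takeWhile_cons, if_pos (by decide), List.takeWhile_cons, if_neg (by decide)]
          have hdrp : ('u' :: 'l' :: 'e' :: ' ' :: (line.dropWhile pvBlank).drop 5).dropWhile pvW
              = ' ' :: (line.dropWhile pvBlank).drop 5 := by
            rw [List.dropWhile_cons, if_pos (by decide), List.dropWhile_cons, if_pos (by decide),
              List.dropWhile_cons, if_pos (by decide), List.dropWhile_cons, if_neg (by decide)]
          rw [htake, hdrp]
          have hcong : pvWords (' ' :: (line.dropWhile pvBlank).drop 5)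
              = pvWords ((line.dropWhile pvBlank).drop 5) :=
            pvWords_congr (by rw [List.dropWhile_cons, if_pos (by decide)])
          rw [hcong]
          rw [pvWords_eq_cons (by rw [hdw]; exact hr2)]
        -- assemble both sides
        have hnameB : (c :: u).takeWhile pvWord = c :: u.takeWhile pvW := by
          rw [List.takeWhile_cons, if_pos (by simp [pvWord, hcbl, beq_eq_false_iff_ne.mpr hcn])]
          congr 1
          exact pvTW_congr _ _ _ (fun x hx =>
            (pvWEqWord (hdom x (husub x hx)) (fun h => hn (h ▸ husub x hx))).symm)
        have hcn' : (c == '\n') = false := beq_eq_false_iff_ne.mpr hcn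
        have hA : pvGA line = [String.ofList (if PySem.Chars.endswith (c :: u.takeWhile pvW) [':'] then (c :: u.takeWhile pvW).dropLast else (c :: u.takeWhile pvW))] := by
          simp only [pvGA]
          rw [hstrip, hrs, if_pos hsw, pvSplit₀_eq, hwords, pvPyGet1]
          show [String.ofList (if PySem.Chars.endswith (c :: u.takeWhile pvW) [':'] then PySem.Chars.slice (c :: u.takeWhile pvW) none (some (-1)) else (c :: u.takeWhile pvW))] = _
          rw [pvSlice_neg_one]
        have hB : pvGB line = [String.ofList (if PySem.Chars.endswith ((c :: u).takeWhile pvWord) [':'] then ((c :: u).takeWhile pvWord).dropLast else ((c :: u).takeWhile pvWord))] := by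
          simp only [pvGB, pvHead]
          rw [if_pos h5, hr2]
          show (if (c == '\n') = true then [] else [] ++ [String.ofList (if PySem.Chars.endswith ((c :: u).takeWhile pvWord) [':'] then ((c :: u).takeWhile pvWord).dropLast else ((c :: u).takeWhile pvWord))]) = _
          rw [hcn']
          simp
        rw [hA, hB, hnameB]
  · -- no 'rule ' header on this line
    have hpref : PySem.Chars.rstrip (line.dropWhile pvBlank) <+: line.dropWhile pvBlank := by
      obtain ⟨w, hw1, _⟩ := pvRstrip_decomp (line.dropWhile pvBlank)
      exact ⟨w, hw1.symm⟩
    have hsw : PySem.Chars.startswith (PySem.Chars.strip line) ['r', 'u', 'l', 'e', ' '] = false := by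
      rw [hstrip]
      apply Bool.eq_false_iff.mpr
      intro htrue
      have h1 : ['r', 'u', 'l', 'e', ' '] <+: PySem.Chars.rstrip (line.dropWhile pvBlank) :=
        (PySem.Chars.startswith_iff _ _).mp htrue
      have h2 : ['r', 'u', 'l', 'e', ' '] <+: line.dropWhile pvBlank := h1.trans hpref
      have h3 := List.prefix_iff_eq_take.mp h2
      simp only [List.length_cons, List.length_nil] at h3
      exact h5 (by rw [← h3])
    simp only [pvGA, pvGB, pvHead, hsw]
    rw [if_neg (by simp), if_neg h5]

-- ---------- A's fold = flatMap pvGA ----------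

theorem pvFoldA (lines : List (List Char)) : ∀ acc : List String,
    lines.foldl (fun acc line =>
      let line := PySem.Chars.strip line
      if PySem.Chars.startswith line ['r', 'u', 'l', 'e', ' '] then
        match PySem.List.pyGet? (PySem.Chars.split₀ line) 1 with
        | none => acc
        | some name =>
            let name := if PySem.Chars.endswith name [':'] then PySem.Chars.slice name none (some (-1)) else name
            acc ++ [String.ofList name]
      else acc) acc
    = acc ++ lines.flatMap pvGA := by
  induction lines with
  | nil => intro acc; simp
  | cons l ls ih =>
      intro acc
      rw [List.foldl_cons, ih]
      have hb : (let line := PySem.Chars.strip l;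
          if PySem.Chars.startswith line ['r', 'u', 'l', 'e', ' '] then
            match PySem.List.pyGet? (PySem.Chars.split₀ line) 1 with
            | none => acc
            | some name =>
                let name := if PySem.Chars.endswith name [':'] then PySem.Chars.slice name none (some (-1)) else name
                acc ++ [String.ofList name]
          else acc) = acc ++ pvGA l := by
        simp only [pvGA]
        split
        · cases hpg : PySem.List.pyGet? (PySem.Chars.split₀ (PySem.Chars.strip l)) 1 with
          | none => simp
          | some name => simp
        · simp
      rw [hb]
      simp [List.append_assoc]

theorem pvPortA_eq (content : String) :
    extract_rule_names_py content = (PySem.Chars.splitOn content.toList ['\n']).flatMap pvGA := by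
  simp only [extract_rule_names_py]
  rw [pvFoldA]
  simp

theorem pvFlatMap_congr (L : List (List Char)) (h : ∀ l ∈ L, pvGA l = pvGB l) :
    L.flatMap pvGA = L.flatMap pvGB := by
  induction L with
  | nil => simp
  | cons l ls ih =>
      simp only [List.flatMap_cons]
      rw [h l List.mem_cons_self, ih (fun x hx => h x (List.mem_cons_of_mem l hx))]

-- ===== VERDICT (by name: the statement is the Claim_ definition above) =====
theorem extract_rule_names_py_spec : Claim_equal_extract_rule_names_py := by
  intro content hdom
  unfold Spec_extract_rule_names_py
  have hdom' : ∀ c ∈ content.toList, pvDomChar c = true := by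
    unfold Dom_extract_rule_names_py pvDomStr at hdom
    exact fun c hc => List.all_eq_true.mp hdom c hc
  rw [pvPortA_eq, pvSplitOn_eq]
  rw [show extract_rule_names_py_alt content = pvScan content.toList [] from rfl]
  rw [pvScan_spec content.toList.length content.toList [] le_rfl]
  simp only [List.nil_append]
  apply pvFlatMap_congr
  intro l hl
  exact pvGA_eq_pvGB l
    (fun c hc => hdom' c (pvSplitNl_mem content.toList l hl c hc).1)
    (fun hc => (pvSplitNl_mem content.toList l hl '\n' hc).2 rfl)
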